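-- pv_equiv track=rewrite | github.com/ruoyiw/COMP30027-Machine-learning | project 2/test3.py | set_labelTarget
-- ===== SOURCE A (Python) =====
-- def set_labelTarget(original):
-- 	labelSet = []
-- 	for target in original:
-- 		if(target <= 18 and target >= 12):
-- 			labelSet.append("14-16")
-- 		elif(target <= 28 and target >= 22):
-- 			labelSet.append("24-26")
-- 		elif(target <= 38 and target >= 32):
-- 			labelSet.append("34-36")
-- 		elif(target <= 48 and target >= 42):
-- 			labelSet.append("44-46")
-- 		else:
-- 			labelSet.append("?")
-- 	return labelSet
-- ===== SOURCE B (Python) =====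
-- def set_labelTarget(original):
--     out = []
--     for t in original:
--         q, r = divmod(t - 12, 10)
--         if 0 <= q <= 3 and r <= 6:
--             lo = 10 * q + 14
--             out.append(str(lo) + "-" + str(lo + 2))
--         else:
--             out.append("?")
--     return out
-- ===== Notes on version B (the rewrite author's own statement) =====
-- stated objective: alternative
-- what changed: Replaces the four hard-coded range branches and literal labels by arithmetic: divmod(t-12,10) locates the decade band and the label string is computed from the quotient, with no branch chain or label table.
import Mathlib
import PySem

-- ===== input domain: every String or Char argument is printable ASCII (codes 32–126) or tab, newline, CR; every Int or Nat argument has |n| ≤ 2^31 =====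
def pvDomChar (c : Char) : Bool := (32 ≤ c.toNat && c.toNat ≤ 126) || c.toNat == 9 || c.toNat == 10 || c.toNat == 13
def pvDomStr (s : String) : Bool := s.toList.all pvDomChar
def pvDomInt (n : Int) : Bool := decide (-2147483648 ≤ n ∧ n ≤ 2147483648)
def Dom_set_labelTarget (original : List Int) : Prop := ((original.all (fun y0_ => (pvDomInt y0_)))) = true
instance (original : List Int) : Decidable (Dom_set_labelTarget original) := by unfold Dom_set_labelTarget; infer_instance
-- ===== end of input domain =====

-- B replaces A's four hard-coded range branches and literal labels by divmod arithmetic that computes the band index and builds the label string from it (alternative decomposition, same cost).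


-- ===== PORT A =====
-- Port of A: fold over targets, appending via the same if/elif branch chain.
def set_labelTarget (original : List Int) : List String :=
  original.foldl (fun labelSet target =>
    if target ≤ 18 ∧ target ≥ 12 then labelSet ++ ["14-16"]
    else if target ≤ 28 ∧ target ≥ 22 then labelSet ++ ["24-26"]
    else if target ≤ 38 ∧ target ≥ 32 then labelSet ++ ["34-36"]
    else if target ≤ 48 ∧ target ≥ 42 then labelSet ++ ["44-46"]
    else labelSet ++ ["?"]) []

-- ===== PORT B =====
-- Port of B: divmod locates the decade band; the label is built arithmetically from the quotient.
def set_labelTarget_alt (original : List Int) : List String :=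
  original.foldl (fun out t =>
    let q := PySem.Int.floordiv (t - 12) 10
    let r := PySem.Int.mod (t - 12) 10
    if 0 ≤ q ∧ q ≤ 3 ∧ r ≤ 6 then
      let lo := 10 * q + 14
      out ++ [PySem.Int.toStr lo ++ "-" ++ PySem.Int.toStr (lo + 2)]
    else out ++ ["?"]) []

-- ===== PRECONDITION & SPEC =====
def Spec_set_labelTarget (original : List Int) (out : List String) : Prop := out = set_labelTarget_alt original
instance (original : List Int) (out : List String) : Decidable (Spec_set_labelTarget original out) := by unfold Spec_set_labelTarget; infer_instance

-- ===== CLAIM (what is proved, stated in full; the proofs are below) =====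
def Claim_equal_set_labelTarget : Prop := ∀ (original : List Int), Dom_set_labelTarget original → Spec_set_labelTarget original (set_labelTarget original)

-- ===== LEMMAS AND PROOFS =====
theorem foldl_append_map (f : Int → String) (xs : List Int) :
    ∀ acc : List String, xs.foldl (fun s t => s ++ [f t]) acc = acc ++ xs.map f := by
  induction xs with
  | nil => intro acc; simp
  | cons x xs ih => intro acc; simp [List.foldl, ih, List.append_assoc]

theorem point_eq (t : Int) :
    (if t ≤ 18 ∧ t ≥ 12 then "14-16"
     else if t ≤ 28 ∧ t ≥ 22 then "24-26"
     else if t ≤ 38 ∧ t ≥ 32 then "34-36"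
     else if t ≤ 48 ∧ t ≥ 42 then "44-46"
     else "?") =
    (let q := PySem.Int.floordiv (t - 12) 10
     let r := PySem.Int.mod (t - 12) 10
     if 0 ≤ q ∧ q ≤ 3 ∧ r ≤ 6 then
       let lo := 10 * q + 14
       PySem.Int.toStr lo ++ "-" ++ PySem.Int.toStr (lo + 2)
     else "?") := by
  have hq : PySem.Int.floordiv (t - 12) 10 = (t - 12) / 10 :=
    PySem.Int.floordiv_eq_ediv_of_pos (by norm_num)
  have hr : PySem.Int.mod (t - 12) 10 = (t - 12) % 10 :=
    PySem.Int.mod_eq_emod_of_pos (by norm_num)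
  simp only [hq, hr]
  split_ifs with h1 h2 h3 h4 h5 <;> try (exfalso; omega)
  · have : (t - 12) / 10 = 0 := by omega
    rw [this]; decide
  · have : (t - 12) / 10 = 1 := by omega
    rw [this]; decide
  · have : (t - 12) / 10 = 2 := by omega
    rw [this]; decide
  · have : (t - 12) / 10 = 3 := by omega
    rw [this]; decide
  · rfl

-- ===== VERDICT (by name: the statement is the Claim_ definition above) =====
theorem set_labelTarget_spec : Claim_equal_set_labelTarget := by
  intro original _
  show set_labelTarget original = set_labelTarget_alt original
  unfold set_labelTarget set_labelTarget_alt
  have hA : original.foldl (fun labelSet target =>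
      if target ≤ 18 ∧ target ≥ 12 then labelSet ++ ["14-16"]
      else if target ≤ 28 ∧ target ≥ 22 then labelSet ++ ["24-26"]
      else if target ≤ 38 ∧ target ≥ 32 then labelSet ++ ["34-36"]
      else if target ≤ 48 ∧ target ≥ 42 then labelSet ++ ["44-46"]
      else labelSet ++ ["?"]) []
      = original.map (fun t => (if t ≤ 18 ∧ t ≥ 12 then "14-16"
        else if t ≤ 28 ∧ t ≥ 22 then "24-26"
        else if t ≤ 38 ∧ t ≥ 32 then "34-36"
        else if t ≤ 48 ∧ t ≥ 42 then "44-46"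
        else "?")) := by
    have := foldl_append_map (fun t => (if t ≤ 18 ∧ t ≥ 12 then "14-16"
        else if t ≤ 28 ∧ t ≥ 22 then "24-26"
        else if t ≤ 38 ∧ t ≥ 32 then "34-36"
        else if t ≤ 48 ∧ t ≥ 42 then "44-46"
        else "?")) original []
    simp only [List.nil_append] at this
    rw [← this]; congr 1; funext s t; split_ifs <;> rfl
  have hB : original.foldl (fun out t =>
      let q := PySem.Int.floordiv (t - 12) 10
      let r := PySem.Int.mod (t - 12) 10
      if 0 ≤ q ∧ q ≤ 3 ∧ r ≤ 6 then
        let lo := 10 * q + 14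
        out ++ [PySem.Int.toStr lo ++ "-" ++ PySem.Int.toStr (lo + 2)]
      else out ++ ["?"]) []
      = original.map (fun t =>
        (let q := PySem.Int.floordiv (t - 12) 10
         let r := PySem.Int.mod (t - 12) 10
         if 0 ≤ q ∧ q ≤ 3 ∧ r ≤ 6 then
           let lo := 10 * q + 14
           PySem.Int.toStr lo ++ "-" ++ PySem.Int.toStr (lo + 2)
         else "?")) := by
    have := foldl_append_map (fun t =>
        (let q := PySem.Int.floordiv (t - 12) 10
         let r := PySem.Int.mod (t - 12) 10
         if 0 ≤ q ∧ q ≤ 3 ∧ r ≤ 6 then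
           let lo := 10 * q + 14
           PySem.Int.toStr lo ++ "-" ++ PySem.Int.toStr (lo + 2)
         else "?")) original []
    simp only [List.nil_append] at this
    rw [← this]; congr 1; funext s t
    simp only []; split_ifs <;> rfl
  rw [hA, hB]
  exact List.map_congr_left (fun t _ => point_eq t)
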